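-- pv_equiv track=rewrite | github.com/DVDprojectBlue/Multimodal_Ninja_Fruit | src/voskListener/vosk_listener.py | _contains_phrase
-- ===== SOURCE A (Python) =====
-- from typing import Dict, Callable, Iterable, List, Optional, Tuple, Union
--
-- def _contains_phrase(recognized_words: List[str], phrase_words: List[str]) -> bool:
--     span_length = len(phrase_words)
--     if span_length == 0 or len(recognized_words) < span_length:
--         return False
--
--     for start in range(0, len(recognized_words) - span_length + 1):
--         if recognized_words[start : start + span_length] == phrase_words:
--             return True
--     return False
-- ===== SOURCE B (Python) =====
-- def _contains_phrase(recognized_words, phrase_words):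
--     if not phrase_words:
--         return False
--     suffix = recognized_words
--     while len(suffix) >= len(phrase_words):
--         if all(a == b for a, b in zip(suffix, phrase_words)):
--             return True
--         suffix = suffix[1:]
--     return False
-- ===== Notes on version B (the rewrite author's own statement) =====
-- stated objective: alternative
-- what changed: Replaces A's index-arithmetic loop (range over start positions + slice-equality of recognized_words[start:start+m]) by a structural scan over shrinking suffixes: repeatedly test whether the phrase is a prefix of the current suffix (element-wise zip/all, no slice copy of the window) and drop the head word otherwise.
import Mathlib
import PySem

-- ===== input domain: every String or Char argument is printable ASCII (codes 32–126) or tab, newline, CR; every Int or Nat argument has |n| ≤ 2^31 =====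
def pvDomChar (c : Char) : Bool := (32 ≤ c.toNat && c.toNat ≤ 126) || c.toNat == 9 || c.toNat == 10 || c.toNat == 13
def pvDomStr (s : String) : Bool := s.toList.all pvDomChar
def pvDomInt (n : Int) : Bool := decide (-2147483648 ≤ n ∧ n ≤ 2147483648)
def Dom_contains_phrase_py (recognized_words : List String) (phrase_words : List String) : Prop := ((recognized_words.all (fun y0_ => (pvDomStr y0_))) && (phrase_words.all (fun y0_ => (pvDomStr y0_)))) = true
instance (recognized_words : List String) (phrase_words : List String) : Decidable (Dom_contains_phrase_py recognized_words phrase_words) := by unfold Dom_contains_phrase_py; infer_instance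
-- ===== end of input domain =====

-- B replaces A's start-index loop with slice-equality windows by a structural scan
-- over shrinking suffixes with an element-wise prefix test (objective: alternative).
-- ===== PORT A =====
def contains_phrase_py (recognized_words : List String) (phrase_words : List String) : Bool :=
  let span_length := phrase_words.length
  if span_length = 0 ∨ recognized_words.length < span_length then false
  else
    (List.range (recognized_words.length - span_length + 1)).any (fun start =>
      PySem.List.slice recognized_words (some (start : Int)) (some ((start : Int) + (span_length : Int)))
        == phrase_words)

-- ===== PORT B =====
-- all(a == b for a, b in zip(suffix, phrase_words)): pairwise equality up to the shorter list
def pvPrefixZip : List String → List String → Bool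
  | a :: as_, b :: bs => (a == b) && pvPrefixZip as_ bs
  | _, _ => true

-- the while loop of Source B: test prefix at the current suffix, else drop the head
-- (only ever called with phrase_words ≠ [], so the loop stops at the empty suffix)
def pvScan (pw : List String) : List String → Bool
  | [] => false
  | w :: rest =>
    if pw.length ≤ rest.length + 1 then pvPrefixZip (w :: rest) pw || pvScan pw rest
    else false

def contains_phrase_py_alt (recognized_words : List String) (phrase_words : List String) : Bool :=
  if phrase_words.isEmpty then false else pvScan phrase_words recognized_words

-- ===== PRECONDITION & SPEC =====
def Spec_contains_phrase_py (recognized_words : List String) (phrase_words : List String) (out : Bool) : Prop := out = contains_phrase_py_alt recognized_words phrase_words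
instance (recognized_words : List String) (phrase_words : List String) (out : Bool) : Decidable (Spec_contains_phrase_py recognized_words phrase_words out) := by unfold Spec_contains_phrase_py; infer_instance

-- ===== CLAIM (what is proved, stated in full; the proofs are below) =====
def Claim_equal_contains_phrase_py : Prop := ∀ (recognized_words : List String) (phrase_words : List String), Dom_contains_phrase_py recognized_words phrase_words → Spec_contains_phrase_py recognized_words phrase_words (contains_phrase_py recognized_words phrase_words)

-- ===== LEMMAS AND PROOFS =====

theorem pvPrefixZip_iff (ys : List String) : ∀ (xs : List String), ys.length ≤ xs.length →
    (pvPrefixZip xs ys = true ↔ ys <+: xs) := by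
  induction ys with
  | nil => intro xs _; cases xs <;> simp [pvPrefixZip]
  | cons b bs ih =>
    intro xs hlen
    cases xs with
    | nil => simp at hlen
    | cons a as_ =>
      simp only [pvPrefixZip, Bool.and_eq_true, beq_iff_eq, List.cons_prefix_cons]
      constructor
      · rintro ⟨h1, h2⟩
        exact ⟨h1.symm, (ih as_ (by simpa using hlen)).mp h2⟩
      · rintro ⟨h1, h2⟩
        exact ⟨h1.symm, (ih as_ (by simpa using hlen)).mpr h2⟩

theorem pvScan_iff (pw : List String) (hpw : pw ≠ []) : ∀ (rw : List String),
    (pvScan pw rw = true ↔ ∃ i, pw <+: rw.drop i) := by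
  intro rw
  induction rw with
  | nil =>
    refine iff_of_false (by simp [pvScan]) ?_
    rintro ⟨i, h⟩
    simp only [List.drop_nil] at h
    exact hpw (List.prefix_nil.mp h)
  | cons w rest ih =>
    simp only [pvScan]
    by_cases hlen : pw.length ≤ rest.length + 1
    · rw [if_pos hlen]
      simp only [Bool.or_eq_true, ih,
        pvPrefixZip_iff pw (w :: rest) (by simpa using hlen)]
      constructor
      · rintro (h | ⟨i, h⟩)
        · exact ⟨0, by simpa using h⟩
        · exact ⟨i + 1, by simpa using h⟩
      · rintro ⟨i, h⟩
        cases i with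
        | zero => rw [List.drop_zero] at h; exact Or.inl h
        | succ j => rw [List.drop_succ_cons] at h; exact Or.inr ⟨j, h⟩
    · rw [if_neg hlen]
      refine iff_of_false Bool.false_ne_true ?_
      rintro ⟨i, h⟩
      have := h.length_le
      simp only [List.length_drop, List.length_cons] at this
      omega

theorem contA_iff (rw pw : List String) :
    (contains_phrase_py rw pw = true ↔ pw ≠ [] ∧ ∃ i, pw <+: rw.drop i) := by
  unfold contains_phrase_py
  by_cases hg : pw.length = 0 ∨ rw.length < pw.length
  · rw [if_pos hg]
    refine iff_of_false Bool.false_ne_true ?_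
    rintro ⟨hpw, i, h⟩
    have hl := h.length_le
    simp only [List.length_drop] at hl
    have hne : pw.length ≠ 0 := fun h0 => hpw (List.eq_nil_of_length_eq_zero h0)
    omega
  · rw [if_neg hg]
    rw [not_or, not_lt] at hg
    obtain ⟨hm, hn⟩ := hg
    simp only [List.any_eq_true, List.mem_range, PySem.List.slice_natCast_add,
      beq_iff_eq]
    constructor
    · rintro ⟨start, _, hslice⟩
      exact ⟨fun h0 => hm (by simp [h0]), start, List.prefix_iff_eq_take.mpr hslice.symm⟩
    · rintro ⟨_, i, h⟩
      have hl := h.length_le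
      simp only [List.length_drop] at hl
      exact ⟨i, by omega, (List.prefix_iff_eq_take.mp h).symm⟩

theorem contB_iff (rw pw : List String) :
    (contains_phrase_py_alt rw pw = true ↔ pw ≠ [] ∧ ∃ i, pw <+: rw.drop i) := by
  unfold contains_phrase_py_alt
  cases pw with
  | nil => simp
  | cons b bs =>
    simp only [List.isEmpty_cons, ne_eq, reduceCtorEq,
      not_false_eq_true, true_and]
    exact pvScan_iff (b :: bs) (by simp) rw

-- ===== VERDICT (by name: the statement is the Claim_ definition above) =====
theorem contains_phrase_py_spec : Claim_equal_contains_phrase_py := by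
  intro rw pw _
  unfold Spec_contains_phrase_py
  have h1 := contA_iff rw pw
  have h2 := contB_iff rw pw
  cases hA : contains_phrase_py rw pw <;> cases hB : contains_phrase_py_alt rw pw <;>
    simp_all
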